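-- pv_equiv track=rewrite | github.com/alexandraback/datacollection | solutions_5708921029263360_0/Python/Fettn/C.py | check
-- ===== SOURCE A (Python) =====
-- from collections import defaultdict
--
-- def check(result, k):
--     jp_map = defaultdict(lambda: 0)
--     js_map = defaultdict(lambda: 0)
--     ps_map = defaultdict(lambda: 0)
--     for j, p, s in result:
--         jp_k = j + p
--         js_k = j + s
--         ps_k = p + s
--         jp_map[jp_k] += 1
--         js_map[js_k] += 1
--         ps_map[ps_k] += 1
--         jp = jp_map[jp_k]
--         js = js_map[js_k]
--         ps = ps_map[ps_k]
--         if jp > k or js > k or ps > k: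
--             return False
--     return True
-- ===== SOURCE B (Python) =====
-- def _runs_ok(sums, k):
--     # sums is sorted, so equal values are contiguous: every run length must stay <= k
--     i = 0
--     n = len(sums)
--     while i < n:
--         j = i
--         while j < n and sums[j] == sums[i]:
--             j += 1
--         if j - i > k:
--             return False
--         i = j
--     return True
--
--
-- def check(result, k):
--     rows = list(result)
--     return (_runs_ok(sorted(j + p for j, p, s in rows), k)
--             and _runs_ok(sorted(j + s for j, p, s in rows), k)
--             and _runs_ok(sorted(p + s for j, p, s in rows), k))
-- ===== Notes on version B (the rewrite author's own statement) =====
-- stated objective: alternative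
-- what changed: Replaces A's hash-map incremental counting (three defaultdicts updated per element with an early exit) by a sort-based algorithm: sort each of the three pair-sum lists and scan each sorted list once, checking that no run of equal values is longer than k.
import Mathlib
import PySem

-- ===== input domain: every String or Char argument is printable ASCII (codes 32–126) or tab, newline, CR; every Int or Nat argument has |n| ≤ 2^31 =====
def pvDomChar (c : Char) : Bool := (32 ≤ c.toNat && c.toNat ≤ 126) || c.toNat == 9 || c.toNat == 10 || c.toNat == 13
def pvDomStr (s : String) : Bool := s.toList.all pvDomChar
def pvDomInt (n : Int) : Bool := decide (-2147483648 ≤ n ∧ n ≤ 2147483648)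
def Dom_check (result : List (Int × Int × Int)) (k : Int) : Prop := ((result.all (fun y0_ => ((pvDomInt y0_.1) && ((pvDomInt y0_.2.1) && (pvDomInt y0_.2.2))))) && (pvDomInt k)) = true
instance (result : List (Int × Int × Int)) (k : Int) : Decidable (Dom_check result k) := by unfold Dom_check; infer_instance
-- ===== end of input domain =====

-- B replaces the hash-map counting by sort-then-scan-runs; neither program mutates its arguments.

-- ===== PORT A =====
-- the 'for j, p, s in result' loop with its early 'return False', three defaultdict(int) maps as loop state
def checkLoop (k : Int) (jp js ps : PySem.Dict Int Int) : List (Int × Int × Int) → Bool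
  | [] => true
  | (j, p, s) :: rest =>
    let jpK := j + p
    let jsK := j + s
    let psK := p + s
    let jpm := jp.modify jpK 0 (· + 1)   -- jp_map[jp_k] += 1 on a defaultdict(lambda: 0)
    let jsm := js.modify jsK 0 (· + 1)
    let psm := ps.modify psK 0 (· + 1)
    let jpv := jpm.getD jpK 0
    let jsv := jsm.getD jsK 0
    let psv := psm.getD psK 0
    if jpv > k || jsv > k || psv > k then false
    else checkLoop k jpm jsm psm rest

def check (result : List (Int × Int × Int)) (k : Int) : Bool :=
  checkLoop k PySem.Dict.empty PySem.Dict.empty PySem.Dict.empty result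

-- ===== PORT B =====
-- _runs_ok's outer while walks the sorted list run by run: the inner while that advances j
-- over equal values is the takeWhile, 'i = j' drops that run (dropWhile)
def runsOk (sums : List Int) (k : Int) : Bool :=
  match sums with
  | [] => true
  | x :: xs =>
    if ((1 + (xs.takeWhile (fun y => y == x)).length : Int) > k) then false
    else runsOk (xs.dropWhile (fun y => y == x)) k
termination_by sums.length
decreasing_by
  simpa using Nat.lt_succ_of_le (List.length_dropWhile_le _ xs)

def check_alt (result : List (Int × Int × Int)) (k : Int) : Bool :=
  let rows := result
  runsOk (PySem.List.sorted (rows.map (fun t => t.1 + t.2.1)) (fun x => x) false) k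
  && runsOk (PySem.List.sorted (rows.map (fun t => t.1 + t.2.2)) (fun x => x) false) k
  && runsOk (PySem.List.sorted (rows.map (fun t => t.2.1 + t.2.2)) (fun x => x) false) k

-- ===== PRECONDITION & SPEC =====
def Spec_check (result : List (Int × Int × Int)) (k : Int) (out : Bool) : Prop := out = check_alt result k
instance (result : List (Int × Int × Int)) (k : Int) (out : Bool) : Decidable (Spec_check result k out) := by unfold Spec_check; infer_instance

-- ===== CLAIM (what is proved, stated in full; the proofs are below) =====
def Claim_equal_check : Prop := ∀ (result : List (Int × Int × Int)) (k : Int), Dom_check result k → Spec_check result k (check result k)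

-- ===== LEMMAS AND PROOFS =====

-- the common yardstick both sides are reduced to: every occurring pair-sum occurs at most k times
def okCnt (k : Int) (xs : List Int) : Bool := xs.all (fun x => (xs.count x : Int) ≤ k)

lemma okCnt_false {k x : Int} {xs : List Int} (hx : x ∈ xs) (h : k < (xs.count x : Int)) :
    okCnt k xs = false :=
  List.all_eq_false.mpr ⟨x, hx, by simp; omega⟩

lemma okCnt_snoc {k x : Int} {xs : List Int} (h : okCnt k xs = true) (hx : (xs.count x : Int) + 1 ≤ k) :
    okCnt k (xs ++ [x]) = true := by
  apply List.all_eq_true.mpr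
  intro y hy
  have hcy : ∀ z ∈ xs, ((xs.count z : Int)) ≤ k := by
    intro z hz
    simpa using List.all_eq_true.mp h z hz
  simp only [List.count_append, decide_eq_true_eq]
  by_cases hyx : y = x
  · subst hyx; simp; omega
  · have hyxs : y ∈ xs := by
      rcases List.mem_append.mp hy with h' | h'
      · exact h'
      · simp at h'; exact absurd h' hyx
    have hk := hcy y hyxs
    have h0 : List.count y [x] = 0 := by simp [List.count_singleton]; omega
    rw [h0]
    push_cast
    omega

-- A-side invariant: A's loop, started from the counters of prefixes a b c whose counts are all
-- within k, decides exactly the okCnt condition on the completed lists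
lemma loop_eq (k : Int) (l : List (Int × Int × Int)) :
    ∀ (a b c : List Int),
      okCnt k a = true → okCnt k b = true → okCnt k c = true →
      checkLoop k (PySem.Dict.counter a) (PySem.Dict.counter b) (PySem.Dict.counter c) l
        = (okCnt k (a ++ l.map (fun t => t.1 + t.2.1))
           && okCnt k (b ++ l.map (fun t => t.1 + t.2.2))
           && okCnt k (c ++ l.map (fun t => t.2.1 + t.2.2))) := by
  induction l with
  | nil =>
    intro a b c ha hb hc
    simp [checkLoop, ha, hb, hc]
  | cons t rest ih =>
    intro a b c ha hb hc
    obtain ⟨j, p, s⟩ := t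
    have e1 : (PySem.Dict.counter a).modify (j + p) 0 (· + 1)
        = PySem.Dict.counter (a ++ [j + p]) := (PySem.Dict.counter_append_singleton a (j + p)).symm
    have e2 : (PySem.Dict.counter b).modify (j + s) 0 (· + 1)
        = PySem.Dict.counter (b ++ [j + s]) := (PySem.Dict.counter_append_singleton b (j + s)).symm
    have e3 : (PySem.Dict.counter c).modify (p + s) 0 (· + 1)
        = PySem.Dict.counter (c ++ [p + s]) := (PySem.Dict.counter_append_singleton c (p + s)).symm
    simp only [checkLoop, e1, e2, e3, PySem.Dict.getD_counter, List.map_cons]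
    have m1 : j + p ∈ a ++ (j + p) :: rest.map (fun t => t.1 + t.2.1) := by simp
    have m2 : j + s ∈ b ++ (j + s) :: rest.map (fun t => t.1 + t.2.2) := by simp
    have m3 : p + s ∈ c ++ (p + s) :: rest.map (fun t => t.2.1 + t.2.2) := by simp
    by_cases h1 : ((List.count (j + p) (a ++ [j + p]) : Int) > k)
    · have hf : okCnt k (a ++ (j + p) :: rest.map (fun t => t.1 + t.2.1)) = false := by
        apply okCnt_false m1
        simp [List.count_append, List.count_cons_self] at h1 ⊢
        omega
      simp only [decide_eq_true h1, Bool.true_or, if_true]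
      rw [hf]
      simp
    · by_cases h2 : ((List.count (j + s) (b ++ [j + s]) : Int) > k)
      · have hf : okCnt k (b ++ (j + s) :: rest.map (fun t => t.1 + t.2.2)) = false := by
          apply okCnt_false m2
          simp [List.count_append, List.count_cons_self] at h2 ⊢
          omega
        simp only [decide_eq_true h2, Bool.true_or, Bool.or_true, if_true]
        rw [hf]
        simp
      · by_cases h3 : ((List.count (p + s) (c ++ [p + s]) : Int) > k)
        · have hf : okCnt k (c ++ (p + s) :: rest.map (fun t => t.2.1 + t.2.2)) = false := by
            apply okCnt_false m3
            simp [List.count_append, List.count_cons_self] at h3 ⊢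
            omega
          simp only [decide_eq_true h3, Bool.or_true, if_true]
          rw [hf]
          simp
        · have ha' : okCnt k (a ++ [j + p]) = true := okCnt_snoc ha (by simp [List.count_append] at h1 ⊢; omega)
          have hb' : okCnt k (b ++ [j + s]) = true := okCnt_snoc hb (by simp [List.count_append] at h2 ⊢; omega)
          have hc' : okCnt k (c ++ [p + s]) = true := okCnt_snoc hc (by simp [List.count_append] at h3 ⊢; omega)
          rw [if_neg (by
              simp only [decide_eq_false h1, decide_eq_false h2, decide_eq_false h3, Bool.or_false]
              simp), ih _ _ _ ha' hb' hc']
          simp [List.append_assoc]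

-- okCnt only depends on the multiset of elements
lemma okCnt_perm {xs ys : List Int} (h : xs.Perm ys) (k : Int) : okCnt k xs = okCnt k ys := by
  rw [Bool.eq_iff_iff]
  simp only [okCnt, List.all_eq_true]
  constructor <;> intro hh y hy
  · have := hh y (h.mem_iff.mpr hy)
    rwa [h.count_eq] at this
  · have := hh y (h.mem_iff.mp hy)
    rwa [← h.count_eq] at this

-- in a ≤-sorted list every element after the dropped run is strictly greater than the head
lemma dropWhile_gt (x : Int) : ∀ (xs : List Int), (x :: xs).Pairwise (· ≤ ·) →
    ∀ z ∈ xs.dropWhile (fun y => y == x), x < z := by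
  intro xs
  induction xs with
  | nil => intro _ z hz; simp [List.dropWhile] at hz
  | cons y ys ih =>
    intro hp z hz
    by_cases hyx : y = x
    · subst hyx
      rw [List.dropWhile_cons_of_pos (by simp)] at hz
      exact ih (hp.sublist (by simp)) z hz
    · rw [List.dropWhile_cons_of_neg (by simp [hyx])] at hz
      have hxy : x ≤ y := (List.pairwise_cons.mp hp).1 y (by simp)
      have hxy' : x < y := lt_of_le_of_ne hxy (Ne.symm hyx)
      rcases List.mem_cons.mp hz with rfl | hz'
      · exact hxy'
      · have hyz : y ≤ z :=
          (List.pairwise_cons.mp ((List.pairwise_cons.mp hp).2)).1 z hz'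
        omega

-- on a ≤-sorted list the run scan decides exactly the multiplicity condition
lemma runsOk_sorted (k : Int) : ∀ (n : ℕ) (l : List Int), l.length ≤ n →
    l.Pairwise (· ≤ ·) → runsOk l k = okCnt k l := by
  intro n
  induction n with
  | zero =>
    intro l hl _
    have : l = [] := List.eq_nil_of_length_eq_zero (Nat.le_zero.mp hl)
    subst this; simp [runsOk, okCnt]
  | succ m ih =>
    intro l hl hp
    match l with
    | [] => simp [runsOk, okCnt]
    | x :: xs =>
      set t := xs.takeWhile (fun y => y == x) with ht
      set d := xs.dropWhile (fun y => y == x) with hd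
      have hxs : xs = t ++ d := (List.takeWhile_append_dropWhile).symm
      have htx : ∀ z ∈ t, z = x := by
        intro z hz
        have := List.mem_takeWhile_imp hz
        simpa using this
      have hdgt : ∀ z ∈ d, x < z := dropWhile_gt x xs hp
      -- count of x in the whole list is 1 + |t|
      have hcx : (x :: xs).count x = 1 + t.length := by
        rw [List.count_cons_self, hxs, List.count_append]
        have h1 : t.count x = t.length := List.count_eq_length.mpr (fun z hz => by
          simp [htx z hz])
        have h2 : d.count x = 0 := List.count_eq_zero.mpr (fun hm => by
          have := hdgt x hm; omega)
        omega
      -- counts of d-elements are unaffected by dropping the run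
      have hcd : ∀ z ∈ d, (x :: xs).count z = d.count z := by
        intro z hz
        have hzx : x < z := hdgt z hz
        rw [List.count_cons_of_ne (by omega), hxs, List.count_append]
        have : t.count z = 0 := List.count_eq_zero.mpr (fun hm => by
          have := htx z hm; omega)
        omega
      rw [runsOk]
      by_cases hbig : ((1 + (t.length : Int)) > k)
      · rw [if_pos (by simpa using hbig)]
        have hko : okCnt k (x :: xs) = false := by
          apply okCnt_false (List.mem_cons_self)
          rw [hcx]; push_cast; omega
        exact hko.symm
      · rw [if_neg (by simpa using hbig)]
        have hdlen : d.length ≤ m := by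
          have h1 : d.length ≤ xs.length := List.length_dropWhile_le _ xs
          simp at hl; omega
        have hdp : d.Pairwise (· ≤ ·) :=
          hp.sublist ((List.dropWhile_sublist _).cons _)
        rw [ih d hdlen hdp]
        -- with the head run within bounds, the condition on x::xs reduces to the one on d
        rw [Bool.eq_iff_iff]
        simp only [okCnt, List.all_eq_true, decide_eq_true_eq]
        constructor
        · intro hh y hy
          rcases List.mem_cons.mp hy with rfl | hy'
          · rw [hcx]; push_cast at hbig ⊢; omega
          · rw [hxs] at hy'
            rcases List.mem_append.mp hy' with hyt | hyd
            · rw [htx y hyt, hcx]; push_cast at hbig ⊢; omega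
            · rw [hcd y hyd]; exact hh y hyd
        · intro hh y hy
          rw [← hcd y hy]
          exact hh y (by rw [hxs]; simp [hy])

theorem check_alt_eq (result : List (Int × Int × Int)) (k : Int) :
    check_alt result k
      = (okCnt k (result.map (fun t => t.1 + t.2.1))
         && okCnt k (result.map (fun t => t.1 + t.2.2))
         && okCnt k (result.map (fun t => t.2.1 + t.2.2))) := by
  have hs : ∀ xs : List Int,
      runsOk (PySem.List.sorted xs (fun x => x) false) k = okCnt k xs := by
    intro xs
    set l := PySem.List.sorted xs (fun x => x) false with hl
    have hperm : l.Perm xs := PySem.List.sorted_perm xs (fun x => x) false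
    rw [runsOk_sorted k l.length l le_rfl
        (by simpa using PySem.List.sorted_pairwise (xs := xs) (key := fun x => x)),
      okCnt_perm hperm]
  simp only [check_alt, hs, Bool.and_assoc]

theorem check_spec_aux : ∀ (result : List (Int × Int × Int)) (k : Int),
    check result k = check_alt result k := by
  intro result k
  have h0 : okCnt k ([] : List Int) = true := rfl
  have := loop_eq k result [] [] [] h0 h0 h0
  simp only [List.nil_append] at this
  show checkLoop k PySem.Dict.empty PySem.Dict.empty PySem.Dict.empty result = _
  rw [show (PySem.Dict.empty : PySem.Dict Int Int) = PySem.Dict.counter [] from rfl] at *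
  rw [this, check_alt_eq]

-- ===== VERDICT (by name: the statement is the Claim_ definition above) =====
theorem check_spec : Claim_equal_check := by
  intro result k _
  exact check_spec_aux result k
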